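-- pv_equiv track=rewrite | github.com/stlmc/stlmc | visualize/py/dataGenerator.py | genProp
-- ===== SOURCE A (Python) =====
-- def genProp(name, len):
--     res = []
--     for i in range(len):
--         if i%2 == 0:
--             res.append("True")
--         else:
--             res.append("False")
--     resP = dict()
--     resP[name] = res
--     return resP
-- ===== SOURCE B (Python) =====
-- def genProp(name, len):
--     res = (["True", "False"] * ((len + 1) // 2))[:len]
--     return {name: res}
-- ===== Notes on version B (the rewrite author's own statement) =====
-- stated objective: idiomatic
-- what changed: Replaces the per-index loop with a parity branch by tiling the two-element pattern ['True','False'] ceil(len/2) times and trimming with a slice (which also yields [] for len<=0).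
import Mathlib
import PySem

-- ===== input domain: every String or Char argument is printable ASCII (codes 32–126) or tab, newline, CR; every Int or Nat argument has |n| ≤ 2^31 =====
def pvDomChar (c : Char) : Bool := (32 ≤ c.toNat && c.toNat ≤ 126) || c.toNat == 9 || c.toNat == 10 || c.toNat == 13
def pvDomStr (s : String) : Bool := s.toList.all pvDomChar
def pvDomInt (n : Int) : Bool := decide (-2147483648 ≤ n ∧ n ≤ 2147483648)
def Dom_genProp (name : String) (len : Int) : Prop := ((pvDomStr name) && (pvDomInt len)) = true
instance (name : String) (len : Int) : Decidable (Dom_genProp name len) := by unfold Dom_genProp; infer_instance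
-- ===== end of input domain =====

-- B builds the list by tiling ["True","False"] ⌈len/2⌉ times and trimming with a slice, instead of A's per-index loop with a parity branch; objective: simpler/idiomatic, same cost.

-- ===== PORT A =====
-- res = []; for i in range(len): res.append("True" if i%2==0 else "False"); return {name: res}
def genProp (name : String) (len : Int) : List (String × List String) :=
  let res := (PySem.List.pyRange 0 len 1).foldl
    (fun r i => r ++ [if PySem.Int.mod i 2 == 0 then "True" else "False"]) []
  [(name, res)]

-- ===== PORT B =====
-- res = (["True","False"] * ((len+1)//2))[:len]; return {name: res}
-- list * k with k ≤ 0 is []: ported as replicate k.toNat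
def genProp_alt (name : String) (len : Int) : List (String × List String) :=
  let res := PySem.List.slice
    (List.flatten (List.replicate (PySem.Int.floordiv (len + 1) 2).toNat ["True", "False"]))
    none (some len)
  [(name, res)]

-- ===== PRECONDITION & SPEC =====
def Spec_genProp (name : String) (len : Int) (out : List (String × List String)) : Prop := out = genProp_alt name len
instance (name : String) (len : Int) (out : List (String × List String)) : Decidable (Spec_genProp name len out) := by unfold Spec_genProp; infer_instance

-- ===== CLAIM (what is proved, stated in full; the proofs are below) =====
def Claim_equal_genProp : Prop := ∀ (name : String) (len : Int), Dom_genProp name len → Spec_genProp name len (genProp name len)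

-- ===== LEMMAS AND PROOFS =====

-- the tiled pattern is exactly the parity-mapped range
lemma flatten_replicate_pattern (k : Nat) :
    List.flatten (List.replicate k ["True", "False"]) =
      (List.range (2 * k)).map (fun j => if j % 2 == 0 then "True" else "False") := by
  induction k with
  | zero => simp
  | succ k ih =>
    rw [List.replicate_succ', List.flatten_append, ih]
    have h2 : 2 * (k + 1) = (2 * k + 1) + 1 := by ring
    rw [h2, List.range_succ, List.range_succ, List.map_append, List.map_append]
    simp [Nat.add_mod, Nat.mul_mod_right]

lemma genProp_list_eq (len : Int) :
    (PySem.List.pyRange 0 len 1).foldl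
      (fun r i => r ++ [if PySem.Int.mod i 2 == 0 then "True" else "False"]) [] =
    PySem.List.slice
      (List.flatten (List.replicate (PySem.Int.floordiv (len + 1) 2).toNat ["True", "False"]))
      none (some len) := by
  rw [PySem.List.foldl_append_singleton_eq_map, List.nil_append, PySem.List.pyRange_one,
    List.map_map, sub_zero]
  rcases le_or_gt len 0 with h | h
  · have hf : (PySem.Int.floordiv (len + 1) 2).toNat = 0 := by
      have h1 : PySem.Int.floordiv (len + 1) 2 < 1 :=
        (PySem.Int.floordiv_lt_iff_lt_mul (by omega)).mpr (by omega)
      omega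
    have hr : len.toNat = 0 := by omega
    rw [hr, hf]
    simp [PySem.List.slice]
  · have hfd : PySem.Int.floordiv (len + 1) 2 = (len + 1) / 2 :=
      PySem.Int.floordiv_eq_ediv_of_pos (by omega)
    rw [hfd, PySem.List.slice_to _ (le_of_lt h), flatten_replicate_pattern,
      ← List.map_take, List.take_range]
    have hmin : min len.toNat (2 * ((len + 1) / 2).toNat) = len.toNat := by omega
    rw [hmin]
    apply List.map_congr_left
    intro j hj
    have hm : PySem.Int.mod (0 + (j : Int)) 2 = ((j % 2 : Nat) : Int) := by
      rw [zero_add]; exact PySem.Int.mod_natCast j 2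
    simp only [Function.comp, hm]
    rcases Nat.mod_two_eq_zero_or_one j with h2 | h2 <;> simp [h2]

-- ===== VERDICT (by name: the statement is the Claim_ definition above) =====
theorem genProp_spec : Claim_equal_genProp := by
  intro name len _
  unfold Spec_genProp genProp genProp_alt
  rw [genProp_list_eq]
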